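-- pv_equiv track=rewrite | github.com/HeinzJiao/ACPV-Net | tools/polygonize_pslg_one_image.py | _rings_to_segments
-- ===== SOURCE A (Python) =====
-- def _rings_to_segments(ring_xy, closed=True):
--     """一个 ring 的点序列 -> 段列表（端点统一为 (int,int) 元组）"""
--     segs = []
--     n = len(ring_xy)
--     if n >= 2:
--         for i in range(n - 1):
--             x0,y0 = ring_xy[i]; x1,y1 = ring_xy[i+1]
--             a = (int(x0), int(y0)); b = (int(x1), int(y1))
--             segs.append((a, b))
--         if closed and n >= 3:
--             x0,y0 = ring_xy[-1]; x1,y1 = ring_xy[0]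
--             a = (int(x0), int(y0)); b = (int(x1), int(y1))
--             segs.append((a, b))
--     return segs
-- ===== SOURCE B (Python) =====
-- def _rings_to_segments(ring_xy, closed=True):
--     """一个 ring 的点序列 -> 段列表（端点统一为 (int,int) 元组）"""
--     if len(ring_xy) < 2:
--         return []
--     close = closed and len(ring_xy) >= 3
--
--     def walk(first, prev, rest):
--         if not rest:
--             return [(prev, first)] if close else []
--         cur = (int(rest[0][0]), int(rest[0][1]))
--         return [(prev, cur)] + walk(first, cur, rest[1:])
--
--     first = (int(ring_xy[0][0]), int(ring_xy[0][1]))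
--     return walk(first, first, ring_xy[1:])
-- ===== Notes on version B (the rewrite author's own statement) =====
-- stated objective: alternative
-- what changed: Replaces the index loop plus a separate post-loop closing-segment branch with a single structural recursion over the tail of the point list that carries (first, prev) and emits the wrap-around segment at the recursion's base case.
import Mathlib
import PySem

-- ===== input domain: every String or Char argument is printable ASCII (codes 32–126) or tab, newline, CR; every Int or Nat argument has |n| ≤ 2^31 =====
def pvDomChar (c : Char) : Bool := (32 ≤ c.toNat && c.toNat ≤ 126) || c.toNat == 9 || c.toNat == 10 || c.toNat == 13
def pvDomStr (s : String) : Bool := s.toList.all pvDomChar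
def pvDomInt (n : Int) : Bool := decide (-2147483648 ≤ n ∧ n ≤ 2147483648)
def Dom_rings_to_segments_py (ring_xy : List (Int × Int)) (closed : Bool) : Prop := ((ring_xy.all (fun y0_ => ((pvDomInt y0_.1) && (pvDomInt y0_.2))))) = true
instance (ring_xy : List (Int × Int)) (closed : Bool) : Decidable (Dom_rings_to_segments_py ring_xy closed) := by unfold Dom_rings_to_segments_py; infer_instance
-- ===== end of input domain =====

-- B replaces A's index loop plus a separate post-loop closing-segment branch by one
-- structural recursion over the tail, emitting the wrap-around segment at its base case.

-- ===== PORT A =====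
def rings_to_segments_py (ring_xy : List (Int × Int)) (closed : Bool) : List ((Int × Int) × (Int × Int)) :=
  let segs : List ((Int × Int) × (Int × Int)) := []
  let n : Int := ring_xy.length
  if 2 ≤ n then
    -- for i in range(n - 1): segs.append((ring_xy[i], ring_xy[i+1]))  (indices always in range; getD totalizes)
    let segs := (PySem.List.pyRange 0 (n - 1) 1).foldl (fun segs i =>
      let a := PySem.List.pyGetD ring_xy i (0, 0)
      let b := PySem.List.pyGetD ring_xy (i + 1) (0, 0)
      segs ++ [(a, b)]) segs
    if closed = true ∧ 3 ≤ n then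
      segs ++ [(PySem.List.pyGetD ring_xy (-1) (0, 0), PySem.List.pyGetD ring_xy 0 (0, 0))]
    else segs
  else segs

-- ===== PORT B =====
-- the inner recursive 'walk' of Source B ('close' is the captured flag)
def pvWalkB (close : Bool) (first : Int × Int) (prev : Int × Int) : List (Int × Int) → List ((Int × Int) × (Int × Int))
  | [] => if close then [(prev, first)] else []
  | p :: rest => [(prev, (p.1, p.2))] ++ pvWalkB close first (p.1, p.2) rest

def rings_to_segments_py_alt (ring_xy : List (Int × Int)) (closed : Bool) : List ((Int × Int) × (Int × Int)) :=
  if (ring_xy.length : Int) < 2 then []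
  else
    let close := closed && decide (3 ≤ (ring_xy.length : Int))
    match ring_xy with
    | [] => []
    | p :: rest =>
      let first := (p.1, p.2)
      pvWalkB close first first rest

-- ===== PRECONDITION & SPEC =====
def Spec_rings_to_segments_py (ring_xy : List (Int × Int)) (closed : Bool) (out : List ((Int × Int) × (Int × Int))) : Prop := out = rings_to_segments_py_alt ring_xy closed
instance (ring_xy : List (Int × Int)) (closed : Bool) (out : List ((Int × Int) × (Int × Int))) : Decidable (Spec_rings_to_segments_py ring_xy closed out) := by unfold Spec_rings_to_segments_py; infer_instance

-- ===== CLAIM (what is proved, stated in full; the proofs are below) =====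
def Claim_equal_rings_to_segments_py : Prop := ∀ (ring_xy : List (Int × Int)) (closed : Bool), Dom_rings_to_segments_py ring_xy closed → Spec_rings_to_segments_py ring_xy closed (rings_to_segments_py ring_xy closed)

-- ===== LEMMAS AND PROOFS =====

-- A's index loop builds exactly the consecutive-pairs list xs.zip xs.tail.
theorem segs_loop_eq_zip_tail (xs : List (Int × Int)) :
    (PySem.List.pyRange 0 ((xs.length : Int) - 1) 1).foldl (fun segs i =>
      segs ++ [(PySem.List.pyGetD xs i (0, 0), PySem.List.pyGetD xs (i + 1) (0, 0))]) [] =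
    xs.zip xs.tail := by
  rw [PySem.List.foldl_append_singleton_eq_map, PySem.List.pyRange_one]
  apply List.ext_getElem
  · simp
  · intro i h1 h2
    simp only [List.nil_append, List.getElem_map, List.getElem_range, List.getElem_zip,
      List.getElem_tail]
    have hi : i < xs.length - 1 := by simp at h1; omega
    rw [show (0 : Int) + (i : Int) = ((i : Nat) : Int) by omega]
    rw [PySem.List.pyGetD_natCast]
    rw [show ((i : Nat) : Int) + 1 = ((i + 1 : Nat) : Int) by push_cast; ring]
    rw [PySem.List.pyGetD_natCast]
    rw [List.getD_eq_getElem xs _ (by omega), List.getD_eq_getElem xs _ (by omega)]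

-- Python xs[-1] is the last element.
theorem pyGetD_neg_one_eq_last (xs : List (Int × Int)) (h : 1 ≤ xs.length) :
    PySem.List.pyGetD xs (-1) (0, 0) = xs[xs.length - 1]'(by omega) := by
  simp [PySem.List.pyGetD, PySem.List.pyGet?, PySem.List.pyIdx?, h,
    List.getElem?_eq_getElem (show xs.length - 1 < xs.length by omega)]

-- B's recursive walk produces the consecutive pairs of prev :: rest, plus the closing
-- segment (last, first) exactly when the captured flag is set.
theorem walkB_eq_zip (close : Bool) (first prev : Int × Int) (rest : List (Int × Int)) :
    pvWalkB close first prev rest =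
    (prev :: rest).zip rest ++
      (if close then [(rest.getLastD prev, first)] else []) := by
  induction rest generalizing prev with
  | nil => cases close <;> simp [pvWalkB]
  | cons p rs ih =>
    simp only [pvWalkB, ih p, List.getLastD_cons]
    simp

-- ===== VERDICT (by name: the statement is the Claim_ definition above) =====
theorem rings_to_segments_py_spec : Claim_equal_rings_to_segments_py := by
  intro xs c _
  show rings_to_segments_py xs c = rings_to_segments_py_alt xs c
  simp only [rings_to_segments_py, rings_to_segments_py_alt]
  by_cases h2 : 2 ≤ (xs.length : Int)
  · rw [if_pos h2, if_neg (show ¬((xs.length : Int) < 2) by omega)]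
    cases xs with
    | nil => simp at h2
    | cons p rest =>
    rw [segs_loop_eq_zip_tail]
    show _ = pvWalkB (c && decide (3 ≤ ((p :: rest).length : Int))) (p.1, p.2) (p.1, p.2) rest
    rw [walkB_eq_zip]
    have hlast : PySem.List.pyGetD (p :: rest) (-1) (0, 0) = rest.getLastD p := by
      rw [pyGetD_neg_one_eq_last (p :: rest) (by simp)]
      rw [show rest.getLastD p = (p :: rest).getLastD p from (List.getLastD_cons ..).symm,
        List.getLastD_eq_getLast?, List.getLast?_eq_getElem?]
      simp
      rfl
    have h0 : PySem.List.pyGetD (p :: rest) 0 (0, 0) = p := by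
      simp [PySem.List.pyGetD, PySem.List.pyGet?, PySem.List.pyIdx?]
    by_cases h3 : c = true ∧ 3 ≤ ((p :: rest).length : Int)
    · rw [if_pos h3]
      have : (c && decide (3 ≤ ((p :: rest).length : Int))) = true := by
        simp only [h3.1, Bool.true_and, decide_eq_true_eq]
        exact h3.2
      rw [this, if_pos rfl, hlast, h0]
      simp
    · rw [if_neg h3]
      have : (c && decide (3 ≤ ((p :: rest).length : Int))) = false := by
        by_cases hc : c = true
        · simp only [hc, Bool.true_and, decide_eq_false_iff_not]
          exact fun h => h3 ⟨hc, h⟩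
        · simp
          exact fun h => absurd h hc
      rw [this]
      simp
  · rw [if_neg h2, if_pos (show (xs.length : Int) < 2 by omega)]
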